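-- pv_equiv track=rewrite | github.com/ascott97/project_euler | Smallest_Multiple.py | div_1_20
-- ===== SOURCE A (Python) =====
-- def div_1_20(number):
--     div_count = 0
--     for i in range(1,21):
--         if number % i == 0:
--             div_count += 1
--         else:
--             return False
--     if div_count == 20:
--         return True
-- ===== SOURCE B (Python) =====
-- def div_1_20(number):
--     # divisible by every integer 1..20 iff divisible by lcm(1..20) = 232792560
--     return number % 232792560 == 0
-- ===== Notes on version B (the rewrite author's own statement) =====
-- stated objective: simpler
-- what changed: Replaced the loop over all candidate divisors with a single modular reduction by their least common multiple 232792560.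
import Mathlib
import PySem

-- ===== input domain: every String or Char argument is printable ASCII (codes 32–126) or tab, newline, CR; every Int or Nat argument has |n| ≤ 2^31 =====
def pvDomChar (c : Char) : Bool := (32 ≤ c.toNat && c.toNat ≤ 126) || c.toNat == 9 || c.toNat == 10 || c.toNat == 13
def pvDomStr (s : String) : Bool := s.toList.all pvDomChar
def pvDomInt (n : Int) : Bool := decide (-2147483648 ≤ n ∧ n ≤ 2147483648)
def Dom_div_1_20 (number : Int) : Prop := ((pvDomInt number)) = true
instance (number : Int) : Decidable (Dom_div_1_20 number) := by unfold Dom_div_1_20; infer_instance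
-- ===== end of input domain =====

-- B replaces A's 20-iteration divisor loop by one modular reduction by lcm(1..20) = 232792560 (simpler).

-- ===== PORT A =====
-- the for-loop with early return: state = remaining divisors, div_count
def div120Loop (number : Int) : List Int → Int → Option Bool
  | [], cnt => if cnt == 20 then some true else none
  | i :: rest, cnt =>
      if PySem.Int.mod number i == 0 then div120Loop number rest (cnt + 1)
      else some false

def div_1_20 (number : Int) : Option Bool :=
  div120Loop number (PySem.List.pyRange 1 21 1) 0

-- ===== PORT B =====
def div_1_20_alt (number : Int) : Option Bool :=
  some (PySem.Int.mod number 232792560 == 0)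

-- ===== PRECONDITION & SPEC =====
def Spec_div_1_20 (number : Int) (out : Option Bool) : Prop := out = div_1_20_alt number
instance (number : Int) (out : Option Bool) : Decidable (Spec_div_1_20 number out) := by unfold Spec_div_1_20; infer_instance

-- ===== CLAIM (what is proved, stated in full; the proofs are below) =====
def Claim_equal_div_1_20 : Prop := ∀ (number : Int), Dom_div_1_20 number → Spec_div_1_20 number (div_1_20 number)

-- ===== LEMMAS AND PROOFS =====

theorem div120Loop_char (n : Int) (l : List Int) (c : Int) :
    div120Loop n l c =
      if l.all (fun i => PySem.Int.mod n i == 0)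
      then (if c + (l.length : Int) == 20 then some true else none)
      else some false := by
  induction l generalizing c with
  | nil => simp [div120Loop]
  | cons i rest ih =>
    simp only [div120Loop, List.all_cons, List.length_cons]
    by_cases h : PySem.Int.mod n i == 0
    · have harith : c + 1 + (rest.length : Int) = c + ((rest.length : Int) + 1) := by ring
      simp [h, ih, harith]
    · simp [h]

theorem coprime_mul_dvd (n a b : Int) (hg : Int.gcd a b = 1) (ha : a ∣ n) (hb : b ∣ n) :
    a * b ∣ n :=
  (Int.isCoprime_iff_gcd_eq_one.mpr hg).mul_dvd ha hb

theorem lcm_dvd_of (n : Int) (h16 : (16:Int) ∣ n) (h9 : (9:Int) ∣ n) (h5 : (5:Int) ∣ n)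
    (h7 : (7:Int) ∣ n) (h11 : (11:Int) ∣ n) (h13 : (13:Int) ∣ n) (h17 : (17:Int) ∣ n)
    (h19 : (19:Int) ∣ n) : (232792560:Int) ∣ n := by
  have h144 : (144:Int) ∣ n := by
    have := coprime_mul_dvd n 16 9 (by decide) h16 h9; norm_num at this; exact this
  have h720 : (720:Int) ∣ n := by
    have := coprime_mul_dvd n 144 5 (by decide) h144 h5; norm_num at this; exact this
  have h5040 : (5040:Int) ∣ n := by
    have := coprime_mul_dvd n 720 7 (by decide) h720 h7; norm_num at this; exact this
  have h55440 : (55440:Int) ∣ n := by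
    have := coprime_mul_dvd n 5040 11 (by decide) h5040 h11; norm_num at this; exact this
  have h720720 : (720720:Int) ∣ n := by
    have := coprime_mul_dvd n 55440 13 (by decide) h55440 h13; norm_num at this; exact this
  have h12252240 : (12252240:Int) ∣ n := by
    have := coprime_mul_dvd n 720720 17 (by decide) h720720 h17; norm_num at this; exact this
  have := coprime_mul_dvd n 12252240 19 (by decide) h12252240 h19
  norm_num at this; exact this

theorem all_iff_lcm (n : Int) :
    (([1,2,3,4,5,6,7,8,9,10,11,12,13,14,15,16,17,18,19,20] : List Int).all
      (fun i => PySem.Int.mod n i == 0) = true) ↔ (232792560:Int) ∣ n := by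
  simp only [List.all_cons, List.all_nil, Bool.and_true, Bool.and_eq_true, beq_iff_eq,
    PySem.Int.mod_eq_zero_iff_dvd]
  constructor
  · rintro ⟨-, -, -, -, h5, -, h7, -, h9, -, h11, -, h13, -, -, h16, h17, -, h19, -⟩
    exact lcm_dvd_of n h16 h9 h5 h7 h11 h13 h17 h19
  · intro h
    refine ⟨?_, ?_, ?_, ?_, ?_, ?_, ?_, ?_, ?_, ?_, ?_, ?_, ?_, ?_, ?_, ?_, ?_, ?_, ?_, ?_⟩ <;>
      exact dvd_trans (by norm_num) h

-- ===== VERDICT (by name: the statement is the Claim_ definition above) =====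
theorem div_1_20_spec : Claim_equal_div_1_20 := by
  intro n _
  show div_1_20 n = div_1_20_alt n
  have hr : PySem.List.pyRange 1 21 1 =
      ([1,2,3,4,5,6,7,8,9,10,11,12,13,14,15,16,17,18,19,20] : List Int) := by decide
  unfold div_1_20 div_1_20_alt
  rw [hr, div120Loop_char]
  by_cases h : (232792560:Int) ∣ n
  · rw [(all_iff_lcm n).mpr h]
    simp [h]
  · have : (([1,2,3,4,5,6,7,8,9,10,11,12,13,14,15,16,17,18,19,20] : List Int).all
        (fun i => PySem.Int.mod n i == 0)) = false := by
      by_contra hc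
      exact h ((all_iff_lcm n).mp (by simpa using hc))
    rw [this]
    simp [h]
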